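-- pv_equiv track=rewrite | github.com/Dend0x/MUNI_FI | ib111/10/10/v3_lowest.py | lowest_rec
-- ===== SOURCE A (Python) =====
-- def lowest_rec(digits: list[int], prev: int | None, pos: int) -> int | None:
--     if pos == len(digits):
--         return prev
--
--     value = 0
--     mini: int | None = None
--     for i in range(pos, len(digits)):
--         if i > pos and digits[pos] == 0:
--             break
--
--         value = value * 10 + digits[i]
--
--         if prev is not None and value <= prev:
--             continue
--
--         if i + 1 >= len(digits):
--             cur = value
--         else:
--             cur = lowest_rec(digits, value, i + 1)
--         if cur is not None:
--             if mini is None or cur < mini: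
--                 mini = cur
--
--     return mini
-- ===== SOURCE B (Python) =====
-- def lowest_rec(digits: list[int], prev: int | None, pos: int) -> int | None:
--     # Memoized DP on the state (prev, pos); per state: precompute where the loop
--     # stops (leading zero), list the prefix values, evaluate them, take the min.
--     n = len(digits)
--     memo: dict[tuple[int | None, int], int | None] = {}
--
--     def solve(prev, pos):
--         if pos == n:
--             return prev
--         key = (prev, pos)
--         if key in memo:
--             return memo[key]
--         limit = pos + 1 if pos < n and digits[pos] == 0 else n
--         cands = []
--         value = 0
--         for i in range(pos, limit):
--             value = value * 10 + digits[i]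
--             cands.append((value, i))
--         results = [v if i + 1 >= n else solve(v, i + 1)
--                    for (v, i) in cands
--                    if prev is None or v > prev]
--         best = min((r for r in results if r is not None), default=None)
--         memo[key] = best
--         return best
--
--     return solve(prev, pos)
-- ===== Notes on version B (the rewrite author's own statement) =====
-- stated objective: alternative
-- what changed: B replaces A's direct backtracking recursion by memoized dynamic programming on the state (prev, pos) with a two-phase body: precompute the leading-zero stop limit and the list of prefix-value candidates, evaluate them through the memo table, then take min with default None.
-- outside the precondition, e.g. on lowest_rec([1, 2], None, -5): A raises IndexError, B raises IndexError
import Mathlib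
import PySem

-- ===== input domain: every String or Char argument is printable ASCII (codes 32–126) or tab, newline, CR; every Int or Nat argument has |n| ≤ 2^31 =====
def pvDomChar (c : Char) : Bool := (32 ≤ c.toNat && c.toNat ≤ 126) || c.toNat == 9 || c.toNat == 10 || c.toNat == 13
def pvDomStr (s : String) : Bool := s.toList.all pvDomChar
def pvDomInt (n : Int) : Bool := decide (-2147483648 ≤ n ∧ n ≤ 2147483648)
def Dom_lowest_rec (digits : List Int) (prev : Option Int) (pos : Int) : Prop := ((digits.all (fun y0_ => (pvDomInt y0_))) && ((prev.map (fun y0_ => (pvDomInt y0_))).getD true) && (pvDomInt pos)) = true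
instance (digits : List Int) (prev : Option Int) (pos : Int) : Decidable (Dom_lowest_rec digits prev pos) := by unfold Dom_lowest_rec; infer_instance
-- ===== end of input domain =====

-- B: a different decomposition — memoized DP on the state (prev, pos): stop limit, candidate list, evaluation, min.

-- ===== PORT A =====
-- 'prev is not None and value <= prev'
def pvLE (prev : Option Int) (v : Int) : Bool :=
  match prev with
  | none => false
  | some p => v ≤ p

-- 'if mini is None or cur < mini: mini = cur' (cur already known non-None)
def pvMin (mini : Option Int) (c : Int) : Option Int :=
  match mini with
  | none => some c
  | some m => if c < m then some c else some m

mutual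
/-- Port of A. Loop index i = pos + k. Where Python raises (digits[i] out of range,
    excluded by Pre_), `pyGet?` is `none` and the port returns `none`. -/
def lowest_rec (digits : List Int) (prev : Option Int) (pos : Int) : Option Int :=
  if pos = (digits.length : Int) then prev
  else lowestLoopA digits prev pos 0 0 none
termination_by ((digits.length - pos).toNat, 1, 0)
decreasing_by all_goals (simp [Prod.lex_iff]; try omega)

def lowestLoopA (digits : List Int) (prev : Option Int) (pos : Int) (k : Nat)
    (value : Int) (mini : Option Int) : Option Int :=
  if _h : pos + k < (digits.length : Int) then
    if k > 0 ∧ PySem.List.pyGet? digits pos = some 0 then mini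
    else
      match PySem.List.pyGet? digits (pos + k) with
      | none => none  -- Python raises IndexError here; outside Pre_
      | some d =>
        let value' := value * 10 + d
        if pvLE prev value' then
          lowestLoopA digits prev pos (k + 1) value' mini
        else
          let cur := if pos + k + 1 ≥ (digits.length : Int) then some value'
                     else lowest_rec digits (some value') (pos + k + 1)
          let mini' := match cur with
            | none => mini
            | some c => pvMin mini c
          lowestLoopA digits prev pos (k + 1) value' mini'
  else mini
termination_by ((digits.length - pos).toNat, 0, (digits.length - (pos + k)).toNat)
decreasing_by all_goals (simp [Prod.lex_iff]; try omega)
end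

-- ===== PORT B =====
-- B: memoized DP on (prev, pos); per state: stop limit, prefix-value candidates, evaluate, min.
-- Loop index i = pos + k throughout (as in port A).
def buildCands (digits : List Int) (pos limit : Int) (value : Int) (k : Nat)
    (acc : List (Int × Nat)) : Option (List (Int × Nat)) :=
  if pos + k < limit then
    match PySem.List.pyGet? digits (pos + k) with
    | none => none  -- Python raises IndexError here; outside Pre_
    | some d => buildCands digits pos limit (value * 10 + d) (k + 1) (acc ++ [(value * 10 + d, k)])
  else some acc
termination_by (limit - (pos + k)).toNat
decreasing_by all_goals (simp_wf; omega)

mutual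
def lowestSolveB (digits : List Int) (prev : Option Int) (pos : Int)
    (memo : PySem.Dict (Option Int × Int) (Option Int)) :
    Option Int × PySem.Dict (Option Int × Int) (Option Int) :=
  if pos = (digits.length : Int) then (prev, memo)
  else
    match memo.get? (prev, pos) with
    | some v => (v, memo)
    | none =>
      let limit := if pos < (digits.length : Int) ∧ PySem.List.pyGet? digits pos = some 0
                   then pos + 1 else (digits.length : Int)
      match buildCands digits pos limit 0 0 [] with
      | none => (none, memo)  -- Python raises IndexError here; outside Pre_
      | some cands =>
        let r := lowestEvalB digits prev pos cands memo
        let best := PySem.List.min? (r.1.filterMap id) id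
        (best, r.2.insert (prev, pos) best)
termination_by ((digits.length - pos).toNat, 1, 0)
decreasing_by all_goals (simp [Prod.lex_iff]; try omega)

-- the comprehension: filter by 'prev is None or v > prev', evaluate each kept candidate
def lowestEvalB (digits : List Int) (prev : Option Int) (pos : Int)
    (cands : List (Int × Nat)) (memo : PySem.Dict (Option Int × Int) (Option Int)) :
    List (Option Int) × PySem.Dict (Option Int × Int) (Option Int) :=
  match cands with
  | [] => ([], memo)
  | (v, k) :: rest =>
    if pvLE prev v then lowestEvalB digits prev pos rest memo
    else
      let cm := if pos + k + 1 ≥ (digits.length : Int) then ((some v : Option Int), memo)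
                else lowestSolveB digits (some v) (pos + k + 1) memo
      let r := lowestEvalB digits prev pos rest cm.2
      (cm.1 :: r.1, r.2)
termination_by ((digits.length - pos).toNat, 0, cands.length)
decreasing_by all_goals (simp [Prod.lex_iff]; try omega)
end

def lowest_rec_alt (digits : List Int) (prev : Option Int) (pos : Int) : Option Int :=
  (lowestSolveB digits prev pos (PySem.Dict.mk [])).1

-- ===== PRECONDITION & SPEC =====
-- Pre_ excludes exactly the inputs where Python A raises IndexError: pos < -len(digits)
-- (the first loop iteration reads digits[pos] out of range).
def Pre_lowest_rec (digits : List Int) (prev : Option Int) (pos : Int) : Prop :=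
  -(digits.length : Int) ≤ pos
instance (digits : List Int) (prev : Option Int) (pos : Int) : Decidable (Pre_lowest_rec digits prev pos) := by unfold Pre_lowest_rec; infer_instance

def pvWitness_lowest_rec : List Int × Option Int × Int := ([1, 0, 2, 3], none, 0)

def Spec_lowest_rec (digits : List Int) (prev : Option Int) (pos : Int) (out : Option Int) : Prop := out = lowest_rec_alt digits prev pos
instance (digits : List Int) (prev : Option Int) (pos : Int) (out : Option Int) : Decidable (Spec_lowest_rec digits prev pos out) := by unfold Spec_lowest_rec; infer_instance

-- ===== CLAIM (what is proved, stated in full; the proofs are below) =====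
def Claim_equal_lowest_rec : Prop := ∀ (digits : List Int) (prev : Option Int) (pos : Int), Dom_lowest_rec digits prev pos → Pre_lowest_rec digits prev pos → Spec_lowest_rec digits prev pos (lowest_rec digits prev pos)

-- ===== LEMMAS AND PROOFS =====

/-- Every cache entry is the value A's port computes for that state. -/
def GoodMemo (digits : List Int) (memo : PySem.Dict (Option Int × Int) (Option Int)) : Prop :=
  ∀ p q v, memo.get? (p, q) = some v → v = lowest_rec digits p q

/-- The values B's comprehension produces, expressed via A's port. -/
def pureEval (digits : List Int) (prev : Option Int) (pos : Int)
    (cands : List (Int × Nat)) : List (Option Int) :=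
  (cands.filter (fun c => !pvLE prev c.1)).map
    (fun c => if pos + c.2 + 1 ≥ (digits.length : Int) then some c.1
              else lowest_rec digits (some c.1) (pos + c.2 + 1))

/-- A's running minimum, folded over a list of optional results. -/
def foldBest (mini : Option Int) (rs : List (Option Int)) : Option Int :=
  rs.foldl (fun b r => match r with | none => b | some c => pvMin b c) mini

theorem pureEval_nil (digits : List Int) (prev : Option Int) (pos : Int) :
    pureEval digits prev pos [] = [] := rfl

theorem pureEval_cons (digits : List Int) (prev : Option Int) (pos : Int)
    (v : Int) (k : Nat) (rest : List (Int × Nat)) :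
    pureEval digits prev pos ((v, k) :: rest) =
      if pvLE prev v then pureEval digits prev pos rest
      else (if pos + k + 1 ≥ (digits.length : Int) then some v
            else lowest_rec digits (some v) (pos + k + 1)) :: pureEval digits prev pos rest := by
  by_cases hle : pvLE prev v <;> simp [pureEval, hle]

theorem foldBest_eq_foldl (rs : List (Option Int)) (b : Option Int) :
    foldBest b rs = (rs.filterMap id).foldl pvMin b := by
  induction rs generalizing b with
  | nil => rfl
  | cons r rest ih =>
    cases r with
    | none =>
      simp only [foldBest, List.foldl_cons, List.filterMap_cons, id_eq]
      exact ih b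
    | some c =>
      simp only [foldBest, List.foldl_cons, List.filterMap_cons, id_eq]
      exact ih (pvMin b c)

theorem min?_eq_foldl_pvMin (xs : List Int) :
    PySem.List.min? xs id = xs.foldl pvMin none := by
  simp only [PySem.List.min?]
  apply PySem.List.foldl_congr_mem
  intro acc x _
  cases acc <;> rfl

theorem foldBest_none_eq_min? (rs : List (Option Int)) :
    foldBest none rs = PySem.List.min? (rs.filterMap id) id := by
  rw [foldBest_eq_foldl, min?_eq_foldl_pvMin]

theorem buildCands_acc (digits : List Int) (pos limit : Int) (value : Int) (k : Nat)
    (acc : List (Int × Nat)) :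
    buildCands digits pos limit value k acc =
      (buildCands digits pos limit value k []).map (fun l => acc ++ l) := by
  conv_lhs => rw [buildCands.eq_def]
  conv_rhs => rw [buildCands.eq_def]
  by_cases h : pos + k < limit
  · rw [if_pos h, if_pos h]
    cases hd : PySem.List.pyGet? digits (pos + k) with
    | none => rfl
    | some d =>
      dsimp only
      rw [buildCands_acc digits pos limit (value * 10 + d) (k + 1) (acc ++ [(value * 10 + d, k)]),
          buildCands_acc digits pos limit (value * 10 + d) (k + 1) ([] ++ [(value * 10 + d, k)])]
      cases buildCands digits pos limit (value * 10 + d) (k + 1) [] <;> simp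
  · rw [if_neg h, if_neg h]
    simp
termination_by (limit - (pos + k)).toNat
decreasing_by all_goals (simp_wf; omega)

/-- A's loop from offset k equals: build the remaining candidates, evaluate them purely,
    fold the running minimum. `limit` encodes A's leading-zero break. -/
theorem loopA_cands (digits : List Int) (prev : Option Int) (pos limit : Int)
    (k : Nat) (value : Int) (mini : Option Int)
    (hlim : limit = if pos < (digits.length : Int) ∧ PySem.List.pyGet? digits pos = some 0
                    then pos + 1 else (digits.length : Int))
    (hk : pos + k ≤ limit ∨ (digits.length : Int) ≤ pos + k) :
    lowestLoopA digits prev pos k value mini =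
      match buildCands digits pos limit value k [] with
      | none => none
      | some cands => foldBest mini (pureEval digits prev pos cands) := by
  have hlimle : limit ≤ (digits.length : Int) ∨ (digits.length : Int) ≤ pos := by
    rw [hlim]; split_ifs with hc
    · exact Or.inl (by omega)
    · exact Or.inl le_rfl
  rw [lowestLoopA.eq_def, buildCands.eq_def]
  by_cases hin : pos + k < limit
  · -- a real iteration; the break cannot fire here
    have hlt : pos + (k : Int) < (digits.length : Int) := by
      rcases hlimle with h | h
      · omega
      · omega
    rw [dif_pos hlt, if_pos hin]
    have hbr : ¬(k > 0 ∧ PySem.List.pyGet? digits pos = some 0) := by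
      rintro ⟨hk0, hz⟩
      have hposlt : pos < (digits.length : Int) := by omega
      rw [hlim, if_pos ⟨hposlt, hz⟩] at hin
      omega
    rw [if_neg hbr]
    cases hd : PySem.List.pyGet? digits (pos + k) with
    | none => rfl
    | some d =>
      dsimp only
      have ih := fun value mini => loopA_cands digits prev pos limit (k + 1) value mini hlim
        (Or.inl (by omega))
      have hacc := buildCands_acc digits pos limit (value * 10 + d) (k + 1)
        ([] ++ [(value * 10 + d, k)])
      by_cases hle : pvLE prev (value * 10 + d)
      · rw [if_pos hle, ih (value * 10 + d) mini, hacc]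
        cases hbc : buildCands digits pos limit (value * 10 + d) (k + 1) [] with
        | none => rfl
        | some cands => simp [pureEval_cons, hle]
      · rw [if_neg hle]
        rw [ih (value * 10 + d)
          (match (if pos + (k : Int) + 1 ≥ (digits.length : Int) then some (value * 10 + d)
                  else lowest_rec digits (some (value * 10 + d)) (pos + k + 1)) with
           | none => mini | some c => pvMin mini c), hacc]
        cases hbc : buildCands digits pos limit (value * 10 + d) (k + 1) [] with
        | none => rfl
        | some cands =>
          simp only [Option.map_some, List.nil_append, List.singleton_append]
          rw [pureEval_cons, if_neg hle]
          cases hcur : (if pos + (k : Int) + 1 ≥ (digits.length : Int) then some (value * 10 + d)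
                        else lowest_rec digits (some (value * 10 + d)) (pos + (k : Int) + 1)) with
          | none => simp [foldBest]
          | some c => simp [foldBest]
  · -- loop is over (or the break fires): both sides give mini
    rw [if_neg hin]
    by_cases hlt : pos + (k : Int) < (digits.length : Int)
    · rw [dif_pos hlt]
      have hke : pos + (k : Int) = limit := by omega
      have hcond : pos < (digits.length : Int) ∧ PySem.List.pyGet? digits pos = some 0 := by
        by_contra hc
        rw [hlim, if_neg hc] at hke
        omega
      have hkpos : k > 0 := by
        rw [hlim, if_pos hcond] at hke
        omega
      rw [if_pos ⟨hkpos, hcond.2⟩]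
      simp [pureEval_nil, foldBest]
    · rw [dif_neg hlt]
      simp [pureEval_nil, foldBest]
termination_by (limit - (pos + k)).toNat
decreasing_by all_goals (simp_wf; omega)

mutual
theorem solveB_eq (digits : List Int) (prev : Option Int) (pos : Int)
    (memo : PySem.Dict (Option Int × Int) (Option Int)) (hm : GoodMemo digits memo) :
    (lowestSolveB digits prev pos memo).1 = lowest_rec digits prev pos ∧
      GoodMemo digits (lowestSolveB digits prev pos memo).2 := by
  rw [lowestSolveB.eq_def, lowest_rec.eq_def]
  by_cases hp : pos = (digits.length : Int)
  · rw [if_pos hp, if_pos hp]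
    exact ⟨rfl, hm⟩
  · rw [if_neg hp, if_neg hp]
    cases hget : memo.get? (prev, pos) with
    | some v =>
      have hv := hm prev pos v hget
      rw [lowest_rec.eq_def, if_neg hp] at hv
      exact ⟨hv, hm⟩
    | none =>
      dsimp only
      have hk0 : pos + (0 : Nat) ≤ (if pos < (digits.length : Int) ∧
            PySem.List.pyGet? digits pos = some 0 then pos + 1 else (digits.length : Int)) ∨
          (digits.length : Int) ≤ pos + (0 : Nat) := by
        split_ifs <;> omega
      have hA := loopA_cands digits prev pos _ 0 0 none rfl hk0
      cases hbc : buildCands digits pos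
          (if pos < (digits.length : Int) ∧ PySem.List.pyGet? digits pos = some 0
           then pos + 1 else (digits.length : Int)) 0 0 [] with
      | none =>
        rw [hbc] at hA
        exact ⟨hA.symm, hm⟩
      | some cands =>
        rw [hbc] at hA
        have he := evalB_eq digits prev pos cands memo hm
        have hbest : PySem.List.min? ((lowestEvalB digits prev pos cands memo).1.filterMap id) id
            = lowestLoopA digits prev pos 0 0 none := by
          rw [he.1, ← foldBest_none_eq_min?, hA]
        refine ⟨hbest, ?_⟩
        intro p q v hv
        rw [PySem.Dict.get?_insert] at hv
        by_cases hkq : ((p, q) : Option Int × Int) = (prev, pos)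
        · rw [Prod.mk.injEq] at hkq
          obtain ⟨rfl, rfl⟩ := hkq
          rw [if_pos rfl] at hv
          injection hv with hv
          rw [← hv, hbest, lowest_rec.eq_def, if_neg hp]
        · rw [if_neg hkq] at hv
          exact he.2 p q v hv
termination_by ((digits.length - pos).toNat, 1, 0)
decreasing_by all_goals (simp [Prod.lex_iff]; try omega)

theorem evalB_eq (digits : List Int) (prev : Option Int) (pos : Int)
    (cands : List (Int × Nat)) (memo : PySem.Dict (Option Int × Int) (Option Int))
    (hm : GoodMemo digits memo) :
    (lowestEvalB digits prev pos cands memo).1 = pureEval digits prev pos cands ∧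
      GoodMemo digits (lowestEvalB digits prev pos cands memo).2 := by
  cases cands with
  | nil => rw [lowestEvalB.eq_def]; exact ⟨rfl, hm⟩
  | cons c rest =>
    obtain ⟨v, k⟩ := c
    rw [lowestEvalB.eq_def]
    dsimp only
    rw [pureEval_cons]
    by_cases hle : pvLE prev v
    · rw [if_pos hle, if_pos hle]
      exact evalB_eq digits prev pos rest memo hm
    · rw [if_neg hle, if_neg hle]
      by_cases hend : pos + (k : Int) + 1 ≥ (digits.length : Int)
      · rw [if_pos hend, if_pos hend]
        have h := evalB_eq digits prev pos rest memo hm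
        exact ⟨by rw [← h.1], h.2⟩
      · rw [if_neg hend, if_neg hend]
        have hs := solveB_eq digits (some v) (pos + k + 1) memo hm
        have h := evalB_eq digits prev pos rest
          (lowestSolveB digits (some v) (pos + k + 1) memo).2 hs.2
        exact ⟨by rw [← h.1, ← hs.1], h.2⟩
termination_by ((digits.length - pos).toNat, 0, cands.length)
decreasing_by all_goals (simp [Prod.lex_iff]; try omega)
end

-- ===== VERDICT (by name: the statement is the Claim_ definition above) =====
theorem lowest_rec_spec : Claim_equal_lowest_rec := by
  intro digits prev pos _ _
  unfold Spec_lowest_rec lowest_rec_alt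
  exact (solveB_eq digits prev pos (PySem.Dict.mk [])
    (by intro p q v h; simp [PySem.Dict.get?] at h)).1.symm
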